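-- pv_equiv track=rewrite | github.com/Chosephine/algostudy | python/greedy/boj2839.py | delivery
-- ===== SOURCE A (Python) =====
-- def delivery(x: int)->int:
--     five = 0
--     three = 0
--
--     initial_res = x % 5
--     five = (x - initial_res) // 5
--
--     while five > -1:
--         five_res = x - (5 * five)
--
--         if not five_res % 3:
--             three = five_res // 3
--             break
--         else:
--             five -= 1
--
--     if five + three > 0:
--         return five + three
--     else:
--         return -1
-- ===== SOURCE B (Python) =====
-- def delivery(x: int) -> int:
--     count = 0
--     while x >= 0:
--         if x % 5 == 0:
--             total = count + x // 5
--             return total if total > 0 else -1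
--         x -= 3
--         count += 1
--     return -1
-- ===== Notes on version B (the rewrite author's own statement) =====
-- stated objective: alternative
-- what changed: B counts three-kilogram bags by repeatedly subtracting three from the remaining weight until it is divisible by five (the dual of A, which fixes the number of five-kilogram bags and tests divisibility by three), and returns directly from inside the loop instead of via break-out state variables.
import Mathlib
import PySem

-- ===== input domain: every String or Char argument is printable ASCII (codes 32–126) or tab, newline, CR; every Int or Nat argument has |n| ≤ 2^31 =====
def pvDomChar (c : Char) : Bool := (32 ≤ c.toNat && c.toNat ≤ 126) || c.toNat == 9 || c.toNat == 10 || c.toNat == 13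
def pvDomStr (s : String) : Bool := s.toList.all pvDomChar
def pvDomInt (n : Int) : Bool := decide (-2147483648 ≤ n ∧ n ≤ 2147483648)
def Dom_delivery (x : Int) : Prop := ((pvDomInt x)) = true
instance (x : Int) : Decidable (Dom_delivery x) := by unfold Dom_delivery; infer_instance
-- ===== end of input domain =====

-- B counts 3 kg bags by stepping the weight down by 3 and testing divisibility by 5 — the dual
-- of A, which fixes the number of 5 kg bags and tests divisibility by 3 (alternative decomposition).

-- ===== PORT A =====
-- A's while loop: state (five, three); returns the final (five, three)
def deliveryLoop (x : Int) (five : Int) : Int × Int :=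
  if five > -1 then
    let five_res := x - 5 * five
    if PySem.Int.mod five_res 3 = 0 then
      (five, PySem.Int.floordiv five_res 3)
    else
      deliveryLoop x (five - 1)
  else (five, 0)
termination_by (five + 1).toNat
decreasing_by omega

def delivery (x : Int) : Int :=
  let initial_res := PySem.Int.mod x 5
  let five0 := PySem.Int.floordiv (x - initial_res) 5
  let ft := deliveryLoop x five0
  if ft.1 + ft.2 > 0 then ft.1 + ft.2 else -1

-- ===== PORT B =====
-- B's while loop: x is mutated (x -= 3), count accumulates; returns from inside the loop
def deliveryAltLoop (x : Int) (count : Int) : Int :=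
  if x ≥ 0 then
    if PySem.Int.mod x 5 = 0 then
      let total := count + PySem.Int.floordiv x 5
      if total > 0 then total else -1
    else
      deliveryAltLoop (x - 3) (count + 1)
  else -1
termination_by x.toNat
decreasing_by
  have hx5 : PySem.Int.mod x 5 = x % 5 := PySem.Int.mod_eq_emod_of_pos (by omega)
  simp only [hx5] at *; omega

def delivery_alt (x : Int) : Int :=
  deliveryAltLoop x 0

-- ===== PRECONDITION & SPEC =====
def Spec_delivery (x : Int) (out : Int) : Prop := out = delivery_alt x
instance (x : Int) (out : Int) : Decidable (Spec_delivery x out) := by unfold Spec_delivery; infer_instance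

-- ===== CLAIM (what is proved, stated in full; the proofs are below) =====
def Claim_equal_delivery : Prop := ∀ (x : Int), Dom_delivery x → Spec_delivery x (delivery x)

-- ===== LEMMAS AND PROOFS =====

-- one-step unfoldings of A's loop
theorem loopA_break (x g : Int) (hgt : g > -1) (hb : (x - 5*g) % 3 = 0) :
    deliveryLoop x g = (g, PySem.Int.floordiv (x - 5*g) 3) := by
  have hm : PySem.Int.mod (x - 5*g) 3 = (x - 5*g) % 3 := PySem.Int.mod_eq_emod_of_pos (by norm_num)
  rw [deliveryLoop]; simp only [if_pos hgt, hm, if_pos hb]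

theorem loopA_step (x g : Int) (hgt : g > -1) (hb : ¬ (x - 5*g) % 3 = 0) :
    deliveryLoop x g = deliveryLoop x (g - 1) := by
  have hm : PySem.Int.mod (x - 5*g) 3 = (x - 5*g) % 3 := PySem.Int.mod_eq_emod_of_pos (by norm_num)
  rw [deliveryLoop]; simp only [if_pos hgt, hm, if_neg hb]

theorem loopA_exit (x g : Int) (h : ¬ g > -1) : deliveryLoop x g = (g, 0) := by
  rw [deliveryLoop]; simp [h]

-- one-step unfoldings of B's loop
theorem loopB_ret (x c : Int) (hx : x ≥ 0) (hb : x % 5 = 0) :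
    deliveryAltLoop x c = (if c + x / 5 > 0 then c + x / 5 else -1) := by
  have hm : PySem.Int.mod x 5 = x % 5 := PySem.Int.mod_eq_emod_of_pos (by norm_num)
  have hd : PySem.Int.floordiv x 5 = x / 5 := PySem.Int.floordiv_eq_ediv_of_pos (by norm_num)
  rw [deliveryAltLoop]; simp only [if_pos hx, hm, if_pos hb, hd]

theorem loopB_step (x c : Int) (hx : x ≥ 0) (hb : ¬ x % 5 = 0) :
    deliveryAltLoop x c = deliveryAltLoop (x - 3) (c + 1) := by
  have hm : PySem.Int.mod x 5 = x % 5 := PySem.Int.mod_eq_emod_of_pos (by norm_num)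
  rw [deliveryAltLoop]; simp only [if_pos hx, hm, if_neg hb]

theorem loopB_exit (x c : Int) (hx : ¬ x ≥ 0) : deliveryAltLoop x c = -1 := by
  rw [deliveryAltLoop]; simp only [if_neg hx]

-- A's entry value (x - x % 5) // 5 is x / 5
theorem five0_eq (x : Int) : PySem.Int.floordiv (x - PySem.Int.mod x 5) 5 = x / 5 := by
  have hm : PySem.Int.mod x 5 = x % 5 := PySem.Int.mod_eq_emod_of_pos (by norm_num)
  have hd : PySem.Int.floordiv (x - x % 5) 5 = (x - x % 5) / 5 :=
    PySem.Int.floordiv_eq_ediv_of_pos (by norm_num)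
  rw [hm, hd, show x - x % 5 = 5 * (x / 5) by omega, Int.mul_ediv_cancel_left _ (by norm_num)]

theorem delivery_eq_loop (x : Int) :
    delivery x = (if (deliveryLoop x (x/5)).1 + (deliveryLoop x (x/5)).2 > 0
      then (deliveryLoop x (x/5)).1 + (deliveryLoop x (x/5)).2 else -1) := by
  simp only [delivery, five0_eq]

theorem delivery_neg (x : Int) (hx : x < 0) : delivery x = -1 := by
  rw [delivery_eq_loop, loopA_exit x (x/5) (by omega)]
  simp only
  rw [if_neg (by omega)]

theorem delivery_alt_neg (x : Int) (hx : x < 0) : delivery_alt x = -1 :=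
  loopB_exit x 0 (by omega)

-- shifting A's loop by 15 kg / 3 five-bags, provided the break happens at a nonnegative five
theorem loopA_shift : ∀ (n : Nat) (x g : Int), g = n → (x - 5*g) % 3 ≤ g →
    deliveryLoop (x + 15) (g + 3) = ((deliveryLoop x g).1 + 3, (deliveryLoop x g).2) := by
  intro n
  induction n using Nat.strong_induction_on with
  | _ n ih =>
    intro x g hgn h
    have hg : 0 ≤ g := le_trans (Int.emod_nonneg _ (by norm_num)) h
    have e1 : x + 15 - 5 * (g + 3) = x - 5 * g := by ring
    by_cases hbreak : (x - 5*g) % 3 = 0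
    · rw [loopA_break x g (by omega) hbreak,
        loopA_break (x+15) (g+3) (by omega) (by rw [e1]; exact hbreak)]
      simp [e1]
    · rw [loopA_step x g (by omega) hbreak,
        loopA_step (x+15) (g+3) (by omega) (by rw [e1]; exact hbreak),
        show g + 3 - 1 = (g - 1) + 3 by ring,
        ih (g-1).toNat (by omega) x (g-1) (by omega) (by omega)]

-- characterisation of A's loop result when the break is guaranteed
theorem loopA_val : ∀ (n : Nat) (x g : Int), g = n → (x - 5*g) % 3 ≤ g → 0 ≤ x - 5*g →
    (deliveryLoop x g).1 ≤ g ∧ 0 ≤ (deliveryLoop x g).1 ∧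
      3 * (deliveryLoop x g).2 = x - 5 * (deliveryLoop x g).1 := by
  intro n
  induction n using Nat.strong_induction_on with
  | _ n ih =>
    intro x g hgn h h0
    have hg : 0 ≤ g := le_trans (Int.emod_nonneg _ (by norm_num)) h
    by_cases hbreak : (x - 5*g) % 3 = 0
    · rw [loopA_break x g (by omega) hbreak]
      refine ⟨by simp, by simpa using hg, ?_⟩
      have hd : PySem.Int.floordiv (x - 5*g) 3 = (x - 5*g) / 3 :=
        PySem.Int.floordiv_eq_ediv_of_pos (by norm_num)
      simp only [hd]; omega
    · rw [loopA_step x g (by omega) hbreak]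
      have := ih (g-1).toNat (by omega) x (g-1) (by omega) (by omega) (by omega)
      exact ⟨by omega, this.2⟩

theorem delivery_shift (x : Int) (hx : 25 ≤ x) : delivery x = delivery (x - 15) + 3 := by
  have hcond : ((x-15) - 5*((x-15)/5)) % 3 ≤ (x-15)/5 := by
    rw [show (x-15) - 5*((x-15)/5) = (x-15) % 5 by omega]
    have hb1 : (x-15) % 5 % 3 < 3 := Int.emod_lt_of_pos _ (by norm_num)
    have hb2 : 0 ≤ (x-15) % 5 % 3 := Int.emod_nonneg _ (by norm_num)
    omega
  have hsh := loopA_shift ((x-15)/5).toNat (x-15) ((x-15)/5) (by omega) hcond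
  have hval := loopA_val ((x-15)/5).toNat (x-15) ((x-15)/5) (by omega) hcond (by omega)
  rw [delivery_eq_loop, delivery_eq_loop,
    show x / 5 = (x-15)/5 + 3 by omega]
  conv_lhs => rw [show x = (x - 15) + 15 by ring]
  simp only [show x - 15 + 15 - 15 = x - 15 by ring]
  rw [hsh]
  simp only
  have hp : 0 < (deliveryLoop (x-15) ((x-15)/5)).1 + (deliveryLoop (x-15) ((x-15)/5)).2 := by
    omega
  rw [if_pos (by omega), if_pos hp]
  ring

-- shifting B's loop by 15 kg, provided the break happens before x goes negative
theorem loopB_shift : ∀ (n : Nat) (x c : Int), x = n → 0 ≤ c → 3 * ((2*x) % 5) ≤ x → 0 < c + x →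
    deliveryAltLoop (x + 15) c = deliveryAltLoop x c + 3 := by
  intro n
  induction n using Nat.strong_induction_on with
  | _ n ih =>
    intro x c hxn hc hb hp
    have hx : 0 ≤ x := by omega
    by_cases h5 : x % 5 = 0
    · rw [loopB_ret x c hx h5, loopB_ret (x+15) c (by omega) (by omega),
        show (x + 15) / 5 = x / 5 + 3 by omega]
      have ht : 0 < c + x / 5 := by omega
      rw [if_pos ht, if_pos (by omega)]; ring
    · have h2 : ¬ (2*x) % 5 = 0 := by omega
      have h3 : 3 ≤ x := by omega
      have hnext : 3 * ((2*(x-3)) % 5) ≤ x - 3 := by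
        have key : (2*(x-3)) % 5 = (2*x) % 5 - 1 := by
          rw [show 2*(x-3) = 2*x - 6 by ring, Int.sub_emod, show (6:Int) % 5 = 1 by norm_num,
            Int.emod_eq_of_lt (by omega) (by omega)]
        omega
      rw [loopB_step x c hx h5, loopB_step (x+15) c (by omega) (by omega),
        show x + 15 - 3 = (x - 3) + 15 by ring,
        ih (x-3).toNat (by omega) (x-3) (c+1) (by omega) (by omega) hnext (by omega)]

theorem delivery_alt_shift (x : Int) (hx : 27 ≤ x) : delivery_alt x = delivery_alt (x - 15) + 3 := by
  have h2 : (2*(x-15)) % 5 ≤ 4 := by omega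
  have := loopB_shift (x - 15).toNat (x - 15) 0 (by omega) (by omega) (by omega) (by omega)
  simpa [delivery_alt, show x - 15 + 15 = x by ring] using this

theorem delivery_base (x : Int) (h0 : 0 ≤ x) (h1 : x ≤ 26) : delivery x = delivery_alt x := by
  interval_cases x <;>
    simp [delivery, delivery_alt, deliveryLoop, deliveryAltLoop, PySem.Int.mod, PySem.Int.floordiv]

theorem delivery_eq_alt (x : Int) : delivery x = delivery_alt x := by
  by_cases hx : x < 0
  · rw [delivery_neg x hx, delivery_alt_neg x hx]
  · push Not at hx
    have key : ∀ n : Nat, ∀ y : Int, y = n → delivery y = delivery_alt y := by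
      intro n
      induction n using Nat.strong_induction_on with
      | _ n ih =>
        intro y hy
        by_cases h26 : y ≤ 26
        · exact delivery_base y (by omega) h26
        · push Not at h26
          rw [delivery_shift y (by omega), delivery_alt_shift y (by omega),
            ih (y - 15).toNat (by omega) (y - 15) (by omega)]
    exact key x.toNat x (by omega)

-- ===== VERDICT (by name: the statement is the Claim_ definition above) =====
theorem delivery_spec : Claim_equal_delivery := by
  intro x _
  unfold Spec_delivery
  exact delivery_eq_alt x
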